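-- pv_equiv track=rewrite | github.com/markiroberts/aoc2023 | Day12/Day12c.py | conditionreport
-- ===== SOURCE A (Python) =====
-- def conditionreport(springcondition):
--     condition = []
--     brokeninarow = 0
--     for x in range(len(springcondition)):
--         if springcondition[x] == '#':
--             brokeninarow = brokeninarow + 1
--         else:
--             if brokeninarow > 0:
--                 condition.append(brokeninarow)
--                 brokeninarow = 0
--     if brokeninarow > 0:
--         condition.append(brokeninarow)
--     return(tuple(n for n in condition))
-- ===== SOURCE B (Python) =====
-- def conditionreport(springcondition):
--     # run-skipping scan: find each maximal '#' run and record its length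
--     runs = []
--     i = 0
--     n = len(springcondition)
--     while i < n:
--         if springcondition[i] == '#':
--             j = i
--             while j < n and springcondition[j] == '#':
--                 j += 1
--             runs.append(j - i)
--             i = j
--         else:
--             i += 1
--     return tuple(runs)
-- ===== Notes on version B (the rewrite author's own statement) =====
-- stated objective: alternative
-- what changed: Replaces A's per-character state machine (pending-run counter flushed on separators and once after the loop) with a run-skipping scan that, at each broken-spring mark, measures the whole maximal run at once and jumps past it, so no pending state or end-of-string flush exists.
import Mathlib
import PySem

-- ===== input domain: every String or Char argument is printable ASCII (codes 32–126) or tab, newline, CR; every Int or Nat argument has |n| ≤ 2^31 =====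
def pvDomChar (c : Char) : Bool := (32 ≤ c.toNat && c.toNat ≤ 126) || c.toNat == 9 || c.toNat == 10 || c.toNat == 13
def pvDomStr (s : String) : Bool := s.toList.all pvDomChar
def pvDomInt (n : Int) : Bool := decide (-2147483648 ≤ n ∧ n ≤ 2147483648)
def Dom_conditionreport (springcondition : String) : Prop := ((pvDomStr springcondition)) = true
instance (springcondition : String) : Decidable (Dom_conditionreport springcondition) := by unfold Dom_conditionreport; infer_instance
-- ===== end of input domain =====

-- B replaces A's per-character pending-counter state machine with a run-skipping scan
-- that measures each maximal broken-spring run at once (alternative decomposition, same cost).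


-- ===== PORT A =====
-- state machine over the characters: (runs so far, current pending run length), final flush
def conditionreport (springcondition : String) : List Int :=
  let st := springcondition.toList.foldl
    (fun (acc : List Int × Int) c =>
      if c = '#' then (acc.1, acc.2 + 1)
      else if acc.2 > 0 then (acc.1 ++ [acc.2], 0) else acc)
    ([], 0)
  if st.2 > 0 then st.1 ++ [st.2] else st.1

-- ===== PORT B =====
-- inner while loop of Source B: length of the leading '#' run and the remainder after it
def pvCountRun : List Char → Nat × List Char
  | [] => (0, [])
  | c :: rest =>
    if c = '#' then
      let p := pvCountRun rest
      (p.1 + 1, p.2)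
    else (0, c :: rest)

theorem pvCountRun_len (l : List Char) : (pvCountRun l).2.length ≤ l.length := by
  induction l with
  | nil => simp [pvCountRun]
  | cons c rest ih =>
    simp only [pvCountRun]
    split <;> simp <;> omega

-- outer while loop of Source B: at each '#', take the whole maximal run, then jump past it
def pvRuns : List Char → List Int
  | [] => []
  | c :: rest =>
    if c = '#' then
      let p := pvCountRun rest
      ((p.1 : Int) + 1) :: pvRuns p.2
    else pvRuns rest
termination_by l => l.length
decreasing_by
  · have h := pvCountRun_len rest
    simp only [List.length_cons]
    omega
  · simp

def conditionreport_alt (springcondition : String) : List Int :=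
  pvRuns springcondition.toList

-- ===== PRECONDITION & SPEC =====
def Spec_conditionreport (springcondition : String) (out : List Int) : Prop := out = conditionreport_alt springcondition
instance (springcondition : String) (out : List Int) : Decidable (Spec_conditionreport springcondition out) := by unfold Spec_conditionreport; infer_instance

-- ===== CLAIM (what is proved, stated in full; the proofs are below) =====
def Claim_equal_conditionreport : Prop := ∀ (springcondition : String), Dom_conditionreport springcondition → Spec_conditionreport springcondition (conditionreport springcondition)

-- ===== LEMMAS AND PROOFS =====

-- names for A's loop body and final flush (definitionally equal to the port's inline code)
def pvStepA (acc : List Int × Int) (c : Char) : List Int × Int :=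
  if c = '#' then (acc.1, acc.2 + 1)
  else if acc.2 > 0 then (acc.1 ++ [acc.2], 0) else acc

def pvFlush (st : List Int × Int) : List Int :=
  if st.2 > 0 then st.1 ++ [st.2] else st.1

theorem conditionreport_eq (s : String) :
    conditionreport s = pvFlush (s.toList.foldl pvStepA ([], 0)) := rfl

theorem pvRuns_nil : pvRuns [] = [] := by rw [pvRuns.eq_def]

theorem pvRuns_hash (rest : List Char) :
    pvRuns ('#' :: rest) = (((pvCountRun rest).1 : Int) + 1) :: pvRuns (pvCountRun rest).2 := by
  rw [pvRuns.eq_def]; simp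

theorem pvRuns_other {c : Char} (hc : c ≠ '#') (rest : List Char) :
    pvRuns (c :: rest) = pvRuns rest := by
  rw [pvRuns.eq_def]; simp [hc]

theorem pvCountRun_replicate (k : Nat) : pvCountRun (List.replicate k '#') = (k, []) := by
  induction k with
  | zero => simp [pvCountRun]
  | succ m ihm => simp [List.replicate_succ, pvCountRun, ihm]

theorem pvCountRun_replicate_append {c : Char} (hc : c ≠ '#') (k : Nat) (rest : List Char) :
    pvCountRun (List.replicate k '#' ++ c :: rest) = (k, c :: rest) := by
  induction k with
  | zero => simp [pvCountRun, hc]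
  | succ m ihm => simp [List.replicate_succ, pvCountRun, ihm]

-- invariant: A's loop with a pending run of b '#'s computes cond ++ runs of (b '#'s ++ l)
theorem pvFoldl_char (l : List Char) (cond : List Int) (b : Nat) :
    pvFlush (l.foldl pvStepA (cond, (b : Int))) = cond ++ pvRuns (List.replicate b '#' ++ l) := by
  induction l generalizing cond b with
  | nil =>
    cases b with
    | zero => simp [pvFlush, pvRuns_nil]
    | succ k =>
      rw [List.foldl_nil, List.append_nil, List.replicate_succ, pvRuns_hash,
        pvCountRun_replicate]
      simp [pvFlush, pvRuns_nil]
  | cons c rest ih =>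
    rw [List.foldl_cons]
    by_cases hc : c = '#'
    · subst hc
      have hstep : pvStepA (cond, (b : Int)) '#' = (cond, ((b + 1 : Nat) : Int)) := by
        simp [pvStepA]
      rw [hstep, ih cond (b + 1)]
      congr 2
      rw [List.replicate_succ']
      simp
    · cases b with
      | zero =>
        have hstep : pvStepA (cond, ((0 : Nat) : Int)) c = (cond, ((0 : Nat) : Int)) := by
          simp [pvStepA, hc]
        rw [hstep, ih cond 0]
        simp [pvRuns_other hc]
      | succ k =>
        have hstep : pvStepA (cond, ((k + 1 : Nat) : Int)) c
            = (cond ++ [((k + 1 : Nat) : Int)], ((0 : Nat) : Int)) := by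
          simp only [pvStepA, if_neg hc]
          rw [if_pos (by positivity)]
          simp
        rw [hstep, ih (cond ++ [((k + 1 : Nat) : Int)]) 0]
        have h3 : pvRuns (List.replicate (k + 1) '#' ++ c :: rest)
            = (((k : Int)) + 1) :: pvRuns rest := by
          rw [List.replicate_succ, List.cons_append, pvRuns_hash,
            pvCountRun_replicate_append hc, pvRuns_other hc]
        rw [h3]
        simp

-- ===== VERDICT (by name: the statement is the Claim_ definition above) =====
theorem conditionreport_spec : Claim_equal_conditionreport := by
  intro s _
  unfold Spec_conditionreport conditionreport_alt
  rw [conditionreport_eq s]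
  have h := pvFoldl_char s.toList [] 0
  rw [Nat.cast_zero] at h
  simpa using h
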